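-- pv_equiv track=rewrite | github.com/srm999/autotrade | autotrade/broker/schwab_client.py | _looks_like_hash
-- ===== SOURCE A (Python) =====
-- def _looks_like_hash(value: str) -> bool:
--     candidate = (value or "").strip()
--     if not candidate:
--         return False
--     candidate_no_dash = candidate.replace("-", "")
--     has_alpha = any(ch.isalpha() for ch in candidate_no_dash)
--     has_digit = any(ch.isdigit() for ch in candidate_no_dash)
--     return has_alpha and has_digit and len(candidate_no_dash) >= 6
-- ===== SOURCE B (Python) =====
-- def _classify(ch):
--     if ch == '-':
--         return 'dash'
--     if ch.isalpha():
--         return 'alpha'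
--     if ch.isdigit():
--         return 'digit'
--     return 'other'
--
--
-- def _looks_like_hash(value: str) -> bool:
--     candidate = (value or "").strip()
--     if not candidate:
--         return False
--     counts = {}
--     for ch in candidate:
--         key = _classify(ch)
--         counts[key] = counts.get(key, 0) + 1
--     return (counts.get('alpha', 0) > 0
--             and counts.get('digit', 0) > 0
--             and len(candidate) - counts.get('dash', 0) >= 6)
-- ===== Notes on version B (the rewrite author's own statement) =====
-- stated objective: alternative
-- what changed: Instead of de-dashing the string and scanning it twice with any(...) plus len, B classifies each character into a category (dash/alpha/digit/other) and builds a histogram dict of category counts in one counting pass, then answers with three lookups and the arithmetic len(candidate) - counts['dash'].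
import Mathlib
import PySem

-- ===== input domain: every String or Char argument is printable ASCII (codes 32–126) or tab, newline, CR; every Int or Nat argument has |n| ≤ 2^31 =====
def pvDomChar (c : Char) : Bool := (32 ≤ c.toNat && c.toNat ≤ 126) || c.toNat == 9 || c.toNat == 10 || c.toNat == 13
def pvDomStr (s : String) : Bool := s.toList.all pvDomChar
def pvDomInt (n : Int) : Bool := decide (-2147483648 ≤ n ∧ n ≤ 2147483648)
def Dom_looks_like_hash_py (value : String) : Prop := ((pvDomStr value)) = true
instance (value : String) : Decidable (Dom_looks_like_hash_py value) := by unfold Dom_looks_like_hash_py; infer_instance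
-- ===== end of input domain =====

-- B replaces A's replace('-','') + two any(...) scans + len by one pass building a histogram dict of
-- character categories (dash/alpha/digit/other), answered by three lookups (alternative decomposition).

-- ===== PORT A =====
def looks_like_hash_py (value : String) : Bool :=
  -- candidate = (value or "").strip()
  let candidate := PySem.Chars.strip ((if value.toList.isEmpty then "" else value).toList)
  -- if not candidate: return False
  if candidate.isEmpty then false
  else
    -- candidate_no_dash = candidate.replace("-", "")
    let candidate_no_dash := PySem.Chars.replace candidate ['-'] []
    -- has_alpha = any(ch.isalpha() ...), has_digit = any(ch.isdigit() ...)
    let has_alpha := candidate_no_dash.any PySem.Chars.isalpha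
    let has_digit := candidate_no_dash.any PySem.Chars.isdigit
    has_alpha && has_digit && decide (6 ≤ candidate_no_dash.length)

-- ===== PORT B =====
-- Source B's _classify helper: the category label of one character
def pvClassify (ch : Char) : String :=
  if ch = '-' then "dash"
  else if PySem.Chars.isalpha ch then "alpha"
  else if PySem.Chars.isdigit ch then "digit"
  else "other"

def looks_like_hash_py_alt (value : String) : Bool :=
  let candidate := PySem.Chars.strip ((if value.toList.isEmpty then "" else value).toList)
  if candidate.isEmpty then false
  else
    -- counts = {}; for ch in candidate: counts[_classify(ch)] = counts.get(key, 0) + 1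
    let counts : PySem.Dict String Int :=
      candidate.foldl (fun d ch => d.insert (pvClassify ch) (d.getD (pvClassify ch) 0 + 1)) PySem.Dict.empty
    decide (0 < counts.getD "alpha" 0) && decide (0 < counts.getD "digit" 0) &&
      decide (6 ≤ (candidate.length : Int) - counts.getD "dash" 0)

-- ===== PRECONDITION & SPEC =====
def Spec_looks_like_hash_py (value : String) (out : Bool) : Prop := out = looks_like_hash_py_alt value
instance (value : String) (out : Bool) : Decidable (Spec_looks_like_hash_py value out) := by unfold Spec_looks_like_hash_py; infer_instance

-- ===== CLAIM (what is proved, stated in full; the proofs are below) =====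
def Claim_equal_looks_like_hash_py : Prop := ∀ (value : String), Dom_looks_like_hash_py value → Spec_looks_like_hash_py value (looks_like_hash_py value)

-- ===== LEMMAS AND PROOFS =====

-- replace(s, "-", "") removes exactly the dashes
theorem replace_go_dash (l : List Char) : ∀ (fuel : Nat) (acc : List Char), l.length ≤ fuel →
    PySem.Chars.replace.go ['-'] [] fuel l acc = acc.reverse ++ l.filter (· != '-') := by
  induction l with
  | nil =>
      intro fuel acc _
      cases fuel <;> simp [PySem.Chars.replace.go]
  | cons c t ih =>
      intro fuel acc h
      cases fuel with
      | zero => simp at h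
      | succ f =>
        by_cases hc : c = '-'
        · subst hc
          simp only [PySem.Chars.replace.go, List.isPrefixOf]
          rw [if_pos (by decide)]
          show PySem.Chars.replace.go ['-'] [] f t acc = _
          rw [ih f acc (by simpa using h)]
          simp
        · simp only [PySem.Chars.replace.go, List.isPrefixOf]
          rw [if_neg (by simp only [Bool.and_eq_true, beq_iff_eq]; exact fun hcon => hc hcon.1.symm)]
          rw [ih f (c :: acc) (by simpa using h)]
          simp [hc]

theorem replace_dash (s : List Char) : PySem.Chars.replace s ['-'] [] = s.filter (· != '-') := by
  simp only [PySem.Chars.replace]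
  rw [if_neg (by decide)]
  simpa using replace_go_dash s s.length [] le_rfl

-- Source B's counting loop IS Counter(classify(ch) for ch in candidate)
theorem counts_eq_counter (l : List Char) :
    l.foldl (fun d ch => d.insert (pvClassify ch) (d.getD (pvClassify ch) 0 + 1)) PySem.Dict.empty
      = PySem.Dict.counter (l.map pvClassify) := by
  rw [← PySem.Dict.foldl_insert_getD_add_one_eq_counter, List.foldl_map]

theorem count_alpha (l : List Char) :
    (l.map pvClassify).count "alpha" = (l.filter (· != '-')).countP PySem.Chars.isalpha := by
  induction l with
  | nil => rfl
  | cons c t ih =>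
      by_cases hc : c = '-'
      · simp [pvClassify, hc, ih]
      · by_cases ha : PySem.Chars.isalpha c = true
        · simp [pvClassify, hc, ha, ih]
        · by_cases hd : PySem.Chars.isdigit c = true
          · simp [pvClassify, hc, ha, hd, ih]
          · simp [pvClassify, hc, ha, hd, ih]

-- ASCII alpha ranges and the digit range are disjoint
theorem alpha_not_digit (c : Char) (h : PySem.Chars.isalpha c = true) : PySem.Chars.isdigit c = false := by
  have charLe : ∀ a b : Char, a ≤ b → a.toNat ≤ b.toNat := fun a b hab => Fin.mk_le_mk.mp hab
  simp only [PySem.Chars.isalpha, PySem.Chars.isupper, PySem.Chars.islower, Bool.or_eq_true,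
    Bool.and_eq_true, decide_eq_true_eq] at h
  simp only [PySem.Chars.isdigit, Bool.and_eq_false_iff, decide_eq_false_iff_not]
  right
  intro hc
  have h9 := charLe c '9' hc
  have e9 : ('9' : Char).toNat = 57 := rfl
  rcases h with ⟨hA, _⟩ | ⟨ha, _⟩
  · have := charLe 'A' c hA
    have eA : ('A' : Char).toNat = 65 := rfl
    omega
  · have := charLe 'a' c ha
    have ea : ('a' : Char).toNat = 97 := rfl
    omega

theorem count_digit (l : List Char) :
    (l.map pvClassify).count "digit" = (l.filter (· != '-')).countP PySem.Chars.isdigit := by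
  induction l with
  | nil => rfl
  | cons c t ih =>
      by_cases hc : c = '-'
      · simp [pvClassify, hc, ih]
      · by_cases ha : PySem.Chars.isalpha c = true
        · have hd : PySem.Chars.isdigit c = false := alpha_not_digit c ha
          simp [pvClassify, hc, ha, hd, ih]
        · by_cases hd : PySem.Chars.isdigit c = true
          · simp [pvClassify, hc, ha, hd, ih]
          · simp [pvClassify, hc, ha, hd, ih]

theorem count_dash (l : List Char) :
    (l.map pvClassify).count "dash" + (l.filter (· != '-')).length = l.length := by
  induction l with
  | nil => rfl
  | cons c t ih =>
      by_cases hc : c = '-'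
      · simp [pvClassify, hc, ← ih]; omega
      · by_cases ha : PySem.Chars.isalpha c = true
        · simp [pvClassify, hc, ha, ← ih]; omega
        · by_cases hd : PySem.Chars.isdigit c = true
          · simp [pvClassify, hc, ha, hd, ← ih]; omega
          · simp [pvClassify, hc, ha, hd, ← ih]; omega

theorem any_eq_countP_pos (l : List Char) (p : Char → Bool) :
    l.any p = decide (0 < l.countP p) := by
  rcases h : l.any p with _ | _
  · simp only [List.any_eq_false] at h
    simp [List.countP_eq_zero.mpr (by intro a ha; exact h a ha)]
  · simp only [List.any_eq_true] at h
    obtain ⟨a, ha, hp⟩ := h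
    simp [List.countP_pos_iff]
    exact ⟨a, ha, hp⟩

-- ===== VERDICT (by name: the statement is the Claim_ definition above) =====
theorem looks_like_hash_py_spec : Claim_equal_looks_like_hash_py := by
  intro value _
  unfold Spec_looks_like_hash_py looks_like_hash_py looks_like_hash_py_alt
  set candidate := PySem.Chars.strip ((if value.toList.isEmpty then "" else value).toList) with hcand
  by_cases h : candidate.isEmpty
  · simp [h]
  · simp only [h, replace_dash, counts_eq_counter, PySem.Dict.getD_counter,
      count_alpha, count_digit, any_eq_countP_pos]
    have hdash := count_dash candidate
    have h3 : decide (6 ≤ (candidate.filter (· != '-')).length) =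
        decide ((6 : Int) ≤ (candidate.length : Int) -
          ((candidate.map pvClassify).count "dash" : Int)) := by
      rw [decide_eq_decide]; omega
    simp only [Int.natCast_pos, h3]
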